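-- pv_equiv track=rewrite | github.com/Jaeha0526/alphazero_clique | track_edge_coloring.py | edge_to_action
-- ===== SOURCE A (Python) =====
-- def edge_to_action(i, j, n):
--     """Convert vertex pair to action index."""
--     if i > j:
--         i, j = j, i
--     count = 0
--     for vi in range(n):
--         for vj in range(vi + 1, n):
--             if vi == i and vj == j:
--                 return count
--             count += 1
--     return -1
-- ===== SOURCE B (Python) =====
-- def edge_to_action(i, j, n):
--     """Convert vertex pair to action index."""
--     lo, hi = (j, i) if i > j else (i, j)
--     if 0 <= lo < hi < n:
--         return lo * n - lo * (lo + 1) // 2 + (hi - lo - 1)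
--     return -1
-- ===== Notes on version B (the rewrite author's own statement) =====
-- stated objective: faster
-- what changed: Replaces the nested scan over all vertex pairs with a closed-form arithmetic index lo*n - lo*(lo+1)//2 + (hi-lo-1) guarded by a bounds check.
import Mathlib
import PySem

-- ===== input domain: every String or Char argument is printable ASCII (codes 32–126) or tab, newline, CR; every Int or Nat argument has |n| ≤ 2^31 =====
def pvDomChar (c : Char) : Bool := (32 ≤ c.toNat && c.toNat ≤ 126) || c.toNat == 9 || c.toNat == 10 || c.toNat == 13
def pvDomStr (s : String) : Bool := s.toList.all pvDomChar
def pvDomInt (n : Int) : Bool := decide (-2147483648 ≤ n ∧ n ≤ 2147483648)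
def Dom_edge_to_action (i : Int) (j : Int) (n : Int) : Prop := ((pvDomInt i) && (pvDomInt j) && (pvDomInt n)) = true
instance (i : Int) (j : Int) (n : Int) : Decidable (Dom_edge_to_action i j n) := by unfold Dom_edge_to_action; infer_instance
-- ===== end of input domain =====

-- B replaces A's quadratic nested scan over all vertex pairs with a closed-form arithmetic index (bounds-checked); equivalence is total.

-- ===== PORT A =====
-- inner loop: 'for vj in range(vi+1, n): if vi == i and vj == j: return count; count += 1'
-- first component = early-returned count (if any), second = count after the loop
def edgeInner (i : Int) (j : Int) (vi : Int) : List Int → Int → Option Int × Int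
  | [], c => (none, c)
  | vj :: rest, c =>
    if vi = i ∧ vj = j then (some c, c) else edgeInner i j vi rest (c + 1)

-- outer loop: 'for vi in range(n): …' with the early return propagated; 'return -1' at the end
def edgeOuter (i : Int) (j : Int) (n : Int) : List Int → Int → Int
  | [], _ => -1
  | vi :: rest, c =>
    let res := edgeInner i j vi (PySem.List.pyRange (vi + 1) n 1) c
    res.1.getD (edgeOuter i j n rest res.2)

def edge_to_action (i : Int) (j : Int) (n : Int) : Int :=
  let p := if i > j then (j, i) else (i, j)
  edgeOuter p.1 p.2 n (PySem.List.pyRange 0 n 1) 0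

-- ===== PORT B =====
def edge_to_action_alt (i : Int) (j : Int) (n : Int) : Int :=
  let p := if i > j then (j, i) else (i, j)
  if 0 ≤ p.1 ∧ p.1 < p.2 ∧ p.2 < n then
    p.1 * n - PySem.Int.floordiv (p.1 * (p.1 + 1)) 2 + (p.2 - p.1 - 1)
  else -1

-- ===== PRECONDITION & SPEC =====
def Spec_edge_to_action (i : Int) (j : Int) (n : Int) (out : Int) : Prop := out = edge_to_action_alt i j n
instance (i : Int) (j : Int) (n : Int) (out : Int) : Decidable (Spec_edge_to_action i j n out) := by unfold Spec_edge_to_action; infer_instance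

-- ===== CLAIM (what is proved, stated in full; the proofs are below) =====
def Claim_equal_edge_to_action : Prop := ∀ (i : Int) (j : Int) (n : Int), Dom_edge_to_action i j n → Spec_edge_to_action i j n (edge_to_action i j n)

-- ===== LEMMAS AND PROOFS =====

-- inner loop misses every element when vi ≠ i; count advances by the length
theorem edgeInner_miss (i j vi : Int) (h : vi ≠ i) :
    ∀ (L : List Int) (c : Int), edgeInner i j vi L c = (none, c + L.length) := by
  intro L
  induction L with
  | nil => intro c; simp [edgeInner]
  | cons a rest ih =>
    intro c
    rw [edgeInner, if_neg (show ¬(vi = i ∧ a = j) from fun hc => h hc.1), ih]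
    simp [Prod.ext_iff]
    ring

-- inner loop over range(a, b) with vi = i: hit exactly when a ≤ j < b
theorem edgeInner_range (i j a b c : Int) :
    edgeInner i j i (PySem.List.pyRange a b 1) c =
      if a ≤ j ∧ j < b then (some (c + (j - a)), c + (j - a))
      else (none, c + max (b - a) 0) := by
  by_cases hab : b ≤ a
  · rw [PySem.List.pyRange_one_eq_nil hab]
    have hno : ¬ (a ≤ j ∧ j < b) := by omega
    rw [if_neg hno]
    simp [edgeInner, Prod.ext_iff]
    omega
  · rw [not_le] at hab
    rw [PySem.List.pyRange_one_cons hab]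
    by_cases hj : j = a
    · subst hj
      have hyes : j ≤ j ∧ j < b := ⟨le_refl j, hab⟩
      rw [if_pos hyes, edgeInner, if_pos ⟨rfl, rfl⟩]
      simp
    · rw [edgeInner, if_neg (show ¬(i = i ∧ a = j) from fun hc => hj hc.2.symm),
          edgeInner_range i j (a + 1) b (c + 1)]
      by_cases h2 : a ≤ j ∧ j < b
      · have h3 : a + 1 ≤ j ∧ j < b := by omega
        rw [if_pos h3, if_pos h2]
        simp [Prod.ext_iff]
        ring
      · have h3 : ¬ (a + 1 ≤ j ∧ j < b) := by omega
        rw [if_neg h3, if_neg h2]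
        simp [Prod.ext_iff]
        omega
termination_by (b - a).toNat
decreasing_by omega

-- degenerate case i = j: the outer loop never finds the pair
theorem edgeOuter_diag (i n : Int) :
    ∀ (L : List Int) (c : Int), edgeOuter i i n L c = -1 := by
  intro L
  induction L with
  | nil => intro c; simp [edgeOuter]
  | cons a rest ih =>
    intro c
    by_cases ha : a = i
    · subst ha
      rw [edgeOuter]
      rw [edgeInner_range, if_neg (show ¬(a + 1 ≤ a ∧ a < n) by omega)]
      simpa using ih _
    · rw [edgeOuter, edgeInner_miss i i a ha]
      simpa using ih _

-- (i-a)*(2n-i-a-1) is always even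
theorem even_key (i a n : Int) : Even ((i - a) * (2 * n - i - a - 1)) := by
  rcases Int.even_or_odd (i - a) with he | ho
  · exact he.mul_right _
  · obtain ⟨k, hk⟩ := ho
    have h2 : 2 * n - i - a - 1 = 2 * (n - a - k - 1) := by omega
    rw [h2]
    exact (even_two_mul (n - a - k - 1)).mul_left _

-- main invariant: outer loop over range(a, n), with 2*q = (i-a)*(2n-i-a-1) pairs already counted
theorem edgeOuter_range (i j n : Int) (hij : i < j) :
    ∀ (a : Int) (c q : Int), 2 * q = (i - a) * (2 * n - i - a - 1) →
      edgeOuter i j n (PySem.List.pyRange a n 1) c =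
        if a ≤ i ∧ j < n then c + q + (j - i - 1) else -1 := by
  intro a
  induction hd : (n - a).toNat using Nat.strong_induction_on generalizing a with
  | _ d ih =>
  intro c q hq
  by_cases han : n ≤ a
  · rw [PySem.List.pyRange_one_eq_nil han,
        if_neg (show ¬ (a ≤ i ∧ j < n) by omega)]
    simp [edgeOuter]
  · rw [not_le] at han
    obtain ⟨q', hq'e⟩ := even_key i (a + 1) n
    have hq' : 2 * q' = (i - (a + 1)) * (2 * n - i - (a + 1) - 1) := by linarith
    rw [PySem.List.pyRange_one_cons han]
    by_cases hai : a = i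
    · subst hai
      rw [edgeOuter, edgeInner_range]
      by_cases hjn : j < n
      · rw [if_pos (show a + 1 ≤ j ∧ j < n by omega),
            if_pos (show a ≤ a ∧ j < n from ⟨le_refl a, hjn⟩)]
        have hq0 : q = 0 := by nlinarith [hq]
        simp
        omega
      · rw [if_neg (show ¬ (a + 1 ≤ j ∧ j < n) by omega)]
        simp only [Option.getD_none]
        rw [ih (n - (a + 1)).toNat (by omega) (a + 1) rfl _ q' hq',
            if_neg (show ¬ (a + 1 ≤ a ∧ j < n) by omega),
            if_neg (show ¬ (a ≤ a ∧ j < n) by omega)]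
    · rw [edgeOuter, edgeInner_miss i j a hai]
      simp only [Option.getD_none]
      rw [ih (n - (a + 1)).toNat (by omega) (a + 1) rfl _ q' hq']
      have hlen : ((PySem.List.pyRange (a + 1) n 1).length : Int) = n - a - 1 := by
        rw [PySem.List.length_pyRange_one]; omega
      by_cases hc : a ≤ i ∧ j < n
      · rw [if_pos (show a + 1 ≤ i ∧ j < n from ⟨by omega, hc.2⟩), if_pos hc, hlen]
        have key : (i - a) * (2 * n - i - a - 1)
            = (i - (a + 1)) * (2 * n - i - (a + 1) - 1) + 2 * (n - a - 1) := by ring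
        have hqq : q = q' + (n - a - 1) := by linarith
        omega
      · rw [if_neg (show ¬ (a + 1 ≤ i ∧ j < n) by omega), if_neg hc]

theorem edge_total (i j n : Int) : edge_to_action i j n = edge_to_action_alt i j n := by
  have main : ∀ lo hi : Int, lo ≤ hi →
      edgeOuter lo hi n (PySem.List.pyRange 0 n 1) 0 =
        (if 0 ≤ lo ∧ lo < hi ∧ hi < n then
          lo * n - PySem.Int.floordiv (lo * (lo + 1)) 2 + (hi - lo - 1)
        else -1) := by
    intro lo hi hle
    rcases eq_or_lt_of_le hle with heq | hlt
    · rw [← heq, edgeOuter_diag,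
          if_neg (show ¬ (0 ≤ lo ∧ lo < lo ∧ lo < n) by omega)]
    · obtain ⟨q, hqe⟩ := even_key lo 0 n
      have hq : 2 * q = (lo - 0) * (2 * n - lo - 0 - 1) := by linarith
      rw [edgeOuter_range lo hi n hlt 0 0 q hq]
      by_cases hc : 0 ≤ lo ∧ hi < n
      · rw [if_pos hc, if_pos (show 0 ≤ lo ∧ lo < hi ∧ hi < n from ⟨hc.1, hlt, hc.2⟩)]
        rw [PySem.Int.floordiv_eq_ediv_of_pos (by omega)]
        have heven : lo * (lo + 1) % 2 = 0 := by
          rcases Int.even_or_odd lo with he | ho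
          · obtain ⟨k, hk⟩ := he
            have : lo * (lo + 1) = 2 * (k * (lo + 1)) := by rw [hk]; ring
            rw [this]; omega
          · obtain ⟨k, hk⟩ := ho
            have : lo * (lo + 1) = 2 * (lo * (k + 1)) := by rw [hk]; ring
            rw [this]; omega
        have hq2 : 2 * q = 2 * (lo * n) - lo * (lo + 1) := by linarith
        omega
      · rw [if_neg hc, if_neg (show ¬ (0 ≤ lo ∧ lo < hi ∧ hi < n) by omega)]
  unfold edge_to_action edge_to_action_alt
  by_cases h : i > j
  · simp only [if_pos h]
    exact main j i (by omega)
  · simp only [if_neg h]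
    exact main i j (by omega)

-- ===== VERDICT (by name: the statement is the Claim_ definition above) =====
theorem edge_to_action_spec : Claim_equal_edge_to_action := by
  intro i j n _
  unfold Spec_edge_to_action
  exact edge_total i j n
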